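-- pv_equiv track=rewrite | github.com/unshortcode/programming-for-lovers | src/chapter_0/arrays/main.py | min_integer_array
-- ===== SOURCE A (Python) =====
-- def min_integer_array(a: list[int]) -> int:
--     """
--     Returns the minimum value in a list of integers.
--     Parameters:
--         a (list[int]): A list of integers.
--     Returns:
--         int: The minimum value in the list.
--     Raises:
--         ValueError: If the list is empty.
--     """
--     # if len(a) == 0:              # WPS507: Forbidding unpythonic zero-length comparison. In Python, empty sequences (like lists, strings, or tuples) are "falsy."
--     if not a:
--         raise ValueError
--
--     m = a[0]
--     # for i in range(len(a)):
--     #     if a[i] < m: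
--     #         m = a[i]
--     for val in a:
--         if val < m:
--             m = val
--     return m
-- ===== SOURCE B (Python) =====
-- def min_integer_array(a: list[int]) -> int:
--     """Minimum of a list of integers; ValueError on an empty list.
--     Divide-and-conquer: split in half, take the smaller of the two halves' minima."""
--     if not a:
--         raise ValueError
--     if len(a) == 1:
--         return a[0]
--     mid = len(a) // 2
--     left = min_integer_array(a[:mid])
--     right = min_integer_array(a[mid:])
--     return left if left <= right else right
-- ===== Notes on version B (the rewrite author's own statement) =====
-- stated objective: alternative
-- what changed: B computes the minimum by divide-and-conquer recursion on the two halves of the list instead of A's single-pass running-minimum loop.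
import Mathlib
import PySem

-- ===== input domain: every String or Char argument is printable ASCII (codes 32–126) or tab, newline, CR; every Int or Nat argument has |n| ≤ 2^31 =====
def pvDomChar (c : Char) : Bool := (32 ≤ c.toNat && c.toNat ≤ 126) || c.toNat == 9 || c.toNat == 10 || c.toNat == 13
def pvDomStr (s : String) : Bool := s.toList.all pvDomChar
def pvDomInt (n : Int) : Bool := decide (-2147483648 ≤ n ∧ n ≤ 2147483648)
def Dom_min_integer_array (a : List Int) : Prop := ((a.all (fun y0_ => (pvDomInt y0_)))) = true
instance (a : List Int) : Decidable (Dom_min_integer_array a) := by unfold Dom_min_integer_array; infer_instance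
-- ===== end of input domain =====

-- B computes the minimum by divide-and-conquer on the two halves instead of A's running-minimum loop (alternative decomposition).

-- ===== PORT A =====
-- running-minimum scan: m = a[0], then for val in a: if val < m: m = val
def min_integer_array (a : List Int) : Int :=
  match a with
  | [] => 0  -- unreachable under Pre_ (Python raises ValueError)
  | m0 :: _ => a.foldl (fun m val => if val < m then val else m) m0

-- ===== PORT B =====
-- divide-and-conquer: singleton → a[0]; otherwise split at len(a)//2 and take the smaller half-minimum
def min_integer_array_alt (a : List Int) : Int :=
  if _h0 : a = [] then 0  -- unreachable under Pre_ (Python raises ValueError)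
  else if _h1 : a.length = 1 then a.headD 0  -- a[0] on a nonempty list
  else
    let mid := a.length / 2
    let left := min_integer_array_alt (PySem.List.slice a none (some (mid : Int)))   -- a[:mid]
    let right := min_integer_array_alt (PySem.List.slice a (some (mid : Int)) none)  -- a[mid:]
    if left ≤ right then left else right
termination_by a.length
decreasing_by
  · rw [PySem.List.slice_to_natCast]
    have : 0 < a.length := List.length_pos_iff.mpr _h0
    simp; omega
  · rw [PySem.List.slice_from_natCast]
    have : 0 < a.length := List.length_pos_iff.mpr _h0
    simp; omega

-- ===== PRECONDITION & SPEC =====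
-- Pre_ excludes the empty list, on which A raises ValueError.
def Pre_min_integer_array (a : List Int) : Prop := a ≠ []
instance (a : List Int) : Decidable (Pre_min_integer_array a) := by unfold Pre_min_integer_array; infer_instance
def pvWitness_min_integer_array : List Int := ([3, -1, 2])

def Spec_min_integer_array (a : List Int) (out : Int) : Prop := out = min_integer_array_alt a
instance (a : List Int) (out : Int) : Decidable (Spec_min_integer_array a out) := by unfold Spec_min_integer_array; infer_instance

-- ===== CLAIM (what is proved, stated in full; the proofs are below) =====
def Claim_equal_min_integer_array : Prop := ∀ (a : List Int), Dom_min_integer_array a → Pre_min_integer_array a → Spec_min_integer_array a (min_integer_array a)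

-- ===== LEMMAS AND PROOFS =====

theorem pv_step_eq_min (m v : Int) : (if v < m then v else m) = min m v := by
  rw [min_def]; split_ifs <;> first | rfl | omega

theorem pv_foldlA_eq_foldl_min (l : List Int) (m : Int) :
    l.foldl (fun m val => if val < m then val else m) m = l.foldl min m := by
  induction l generalizing m with
  | nil => rfl
  | cons v t ih => simp [List.foldl, pv_step_eq_min]

theorem pv_foldl_min_mem (l : List Int) (m : Int) : l.foldl min m ∈ m :: l := by
  induction l generalizing m with
  | nil => simp
  | cons v t ih =>
    have h := ih (min m v)
    simp only [List.foldl]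
    rcases List.mem_cons.mp h with h1 | h1
    · rw [h1]; rcases min_choice m v with h2 | h2 <;> simp [h2]
    · simp [h1]

theorem pv_foldl_min_le (l : List Int) (m : Int) :
    l.foldl min m ≤ m ∧ ∀ y ∈ l, l.foldl min m ≤ y := by
  induction l generalizing m with
  | nil => simp
  | cons v t ih =>
    obtain ⟨h1, h2⟩ := ih (min m v)
    refine ⟨le_trans h1 (min_le_left _ _), ?_⟩
    intro y hy
    rcases List.mem_cons.mp hy with rfl | hy
    · exact le_trans h1 (min_le_right _ _)
    · exact h2 y hy

-- B returns an element of the list that is ≤ every element.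
theorem pv_alt_min (a : List Int) (h : a ≠ []) :
    min_integer_array_alt a ∈ a ∧ ∀ y ∈ a, min_integer_array_alt a ≤ y := by
  fun_induction min_integer_array_alt a with
  | case1 => exact absurd rfl h
  | case2 a h0 h1 =>
    match a, h1 with
    | [x], _ => simp
  | case3 a h0 h1 mid left right hle ihl ihr =>
    have hlen : 2 ≤ a.length := by
      have h0' : a.length ≠ 0 := fun hh => h0 (List.eq_nil_of_length_eq_zero hh)
      omega
    have hmideq : mid = a.length / 2 := rfl
    have hmid1 : 1 ≤ mid := by omega
    have hmidlt : mid < a.length := by omega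
    have hL : PySem.List.slice a none (some (mid : Int)) = a.take mid := by
      simpa using PySem.List.slice_to_natCast (xs := a) (b := mid)
    have hR : PySem.List.slice a (some (mid : Int)) none = a.drop mid := by
      simpa using PySem.List.slice_from_natCast (xs := a) (a := mid)
    have hLne : PySem.List.slice a none (some (mid : Int)) ≠ [] := by
      rw [hL]; intro he
      have hlt : (a.take mid).length = mid := List.length_take_of_le (by omega)
      rw [he] at hlt; simp at hlt; omega
    have hRne : PySem.List.slice a (some (mid : Int)) none ≠ [] := by
      rw [hR]; intro he
      have hld : (a.drop mid).length = a.length - mid := List.length_drop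
      rw [he] at hld; simp at hld; omega
    have hsplit : PySem.List.slice a none (some (mid : Int)) ++ PySem.List.slice a (some (mid : Int)) none = a := by
      rw [hL, hR]; exact List.take_append_drop mid a
    obtain ⟨hlm, hll⟩ := ihl hLne
    obtain ⟨hrm, hrl⟩ := ihr hRne
    constructor
    · rw [← hsplit]; exact List.mem_append_left _ hlm
    · intro y hy
      rw [← hsplit] at hy
      rcases List.mem_append.mp hy with hy' | hy'
      · exact hll y hy'
      · exact le_trans hle (hrl y hy')
  | case4 a h0 h1 mid left right hle ihl ihr =>
    have hlen : 2 ≤ a.length := by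
      have h0' : a.length ≠ 0 := fun hh => h0 (List.eq_nil_of_length_eq_zero hh)
      omega
    have hmideq : mid = a.length / 2 := rfl
    have hmid1 : 1 ≤ mid := by omega
    have hmidlt : mid < a.length := by omega
    have hL : PySem.List.slice a none (some (mid : Int)) = a.take mid := by
      simpa using PySem.List.slice_to_natCast (xs := a) (b := mid)
    have hR : PySem.List.slice a (some (mid : Int)) none = a.drop mid := by
      simpa using PySem.List.slice_from_natCast (xs := a) (a := mid)
    have hLne : PySem.List.slice a none (some (mid : Int)) ≠ [] := by
      rw [hL]; intro he
      have hlt : (a.take mid).length = mid := List.length_take_of_le (by omega)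
      rw [he] at hlt; simp at hlt; omega
    have hRne : PySem.List.slice a (some (mid : Int)) none ≠ [] := by
      rw [hR]; intro he
      have hld : (a.drop mid).length = a.length - mid := List.length_drop
      rw [he] at hld; simp at hld; omega
    have hsplit : PySem.List.slice a none (some (mid : Int)) ++ PySem.List.slice a (some (mid : Int)) none = a := by
      rw [hL, hR]; exact List.take_append_drop mid a
    obtain ⟨hlm, hll⟩ := ihl hLne
    obtain ⟨hrm, hrl⟩ := ihr hRne
    constructor
    · rw [← hsplit]; exact List.mem_append_right _ hrm
    · intro y hy
      rw [← hsplit] at hy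
      rcases List.mem_append.mp hy with hy' | hy'
      · exact le_trans (le_of_lt (not_le.mp hle)) (hll y hy')
      · exact hrl y hy'

-- ===== VERDICT (by name: the statement is the Claim_ definition above) =====
theorem min_integer_array_spec : Claim_equal_min_integer_array := by
  intro a _ hpre
  unfold Spec_min_integer_array min_integer_array
  match a with
  | [] => exact absurd rfl hpre
  | m0 :: t =>
    simp only [pv_foldlA_eq_foldl_min]
    set l := (m0 :: t : List Int)
    obtain ⟨haltm, haltl⟩ := pv_alt_min l (by simp [l])
    have hr_mem : l.foldl min m0 ∈ l := by
      rcases List.mem_cons.mp (pv_foldl_min_mem l m0) with h1 | h1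
      · rw [h1]; simp [l]
      · exact h1
    have hr_le := (pv_foldl_min_le l m0).2
    exact le_antisymm (hr_le _ haltm) (haltl _ hr_mem)
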